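-- pv_equiv track=rewrite | github.com/yungyuc/nsdhw_19au | hw3/titaneric/matrix_test.py | len_to_2d_index
-- ===== SOURCE A (Python) =====
-- def len_to_2d_index(length, ncol):
--     irow, icol = 0, 0
--     for _ in range(length):
--         yield (irow, icol)
--         icol += 1
--         if icol == ncol:
--             icol = 0
--             irow += 1
-- ===== SOURCE B (Python) =====
-- def len_to_2d_index(length, ncol):
--     for i in range(length):
--         yield divmod(i, ncol)
-- ===== Notes on version B (the rewrite author's own statement) =====
-- stated objective: simpler
-- what changed: B computes each 2D index directly as divmod(i, ncol) in a single comprehension-style loop, eliminating A's mutable irow/icol counters and the conditional wrap-around reset.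
-- outside the precondition, e.g. on len_to_2d_index(3, 0): A returns [(0, 0), (0, 1), (0, 2)], B raises ZeroDivisionError; on len_to_2d_index(3, -2): A returns [(0, 0), (0, 1), (0, 2)], B returns [(0, 0), (-1, -1), (-1, 0)]
import Mathlib
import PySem

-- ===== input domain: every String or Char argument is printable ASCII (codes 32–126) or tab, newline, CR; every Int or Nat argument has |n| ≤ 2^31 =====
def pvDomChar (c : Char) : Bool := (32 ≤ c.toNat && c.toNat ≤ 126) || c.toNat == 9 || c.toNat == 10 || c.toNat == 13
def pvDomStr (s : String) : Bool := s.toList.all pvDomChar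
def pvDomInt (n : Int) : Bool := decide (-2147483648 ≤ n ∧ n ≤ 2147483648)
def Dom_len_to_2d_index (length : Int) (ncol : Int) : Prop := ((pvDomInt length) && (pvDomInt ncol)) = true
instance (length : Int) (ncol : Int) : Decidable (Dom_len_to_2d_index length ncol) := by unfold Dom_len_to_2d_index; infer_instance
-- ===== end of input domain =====

-- B replaces A's mutable irow/icol counters and wrap-around reset with a direct
-- divmod(i, ncol) per element (simpler; same cost). A and B are Python generators;
-- the equivalence is about the sequence of yielded values.


-- ===== PORT A =====
-- loop state: (irow, icol, yielded values so far)
def len_to_2d_index (length : Int) (ncol : Int) : List (Int × Int) :=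
  ((List.range length.toNat).foldl
    (fun (s : Int × Int × List (Int × Int)) _ =>
      let acc := s.2.2 ++ [(s.1, s.2.1)]
      let icol := s.2.1 + 1
      if icol = ncol then (s.1 + 1, 0, acc) else (s.1, icol, acc))
    (0, 0, [])).2.2

-- ===== PORT B =====
def len_to_2d_index_alt (length : Int) (ncol : Int) : List (Int × Int) :=
  (PySem.List.pyRange 0 length 1).map
    (fun i => (PySem.Int.floordiv i ncol, PySem.Int.mod i ncol))

-- ===== PRECONDITION & SPEC =====
-- Pre_ excludes non-positive ncol with a positive length (outside the natural domain of a
-- positive column count): there B's divmod raises ZeroDivisionError for ncol = 0 and, for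
-- negative ncol, A's counters never reset so A keeps row 0 while B's divmod values differ.
def Pre_len_to_2d_index (length : Int) (ncol : Int) : Prop := 1 ≤ ncol ∨ length ≤ 0
instance (length : Int) (ncol : Int) : Decidable (Pre_len_to_2d_index length ncol) := by unfold Pre_len_to_2d_index; infer_instance
def pvWitness_len_to_2d_index : Int × Int := (7, 3)

def Spec_len_to_2d_index (length : Int) (ncol : Int) (out : List (Int × Int)) : Prop := out = len_to_2d_index_alt length ncol
instance (length : Int) (ncol : Int) (out : List (Int × Int)) : Decidable (Spec_len_to_2d_index length ncol out) := by unfold Spec_len_to_2d_index; infer_instance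

-- ===== CLAIM (what is proved, stated in full; the proofs are below) =====
def Claim_equal_len_to_2d_index : Prop := ∀ (length : Int) (ncol : Int), Dom_len_to_2d_index length ncol → Pre_len_to_2d_index length ncol → Spec_len_to_2d_index length ncol (len_to_2d_index length ncol)

-- ===== LEMMAS AND PROOFS =====

-- Invariant of A's loop: after n iterations the counters are (n / ncol, n % ncol)
-- and the accumulator holds the first n divmod pairs.
theorem len_to_2d_loop_inv (ncol : Int) (h : 1 ≤ ncol) (n : Nat) :
    (List.range n).foldl
      (fun (s : Int × Int × List (Int × Int)) _ =>
        let acc := s.2.2 ++ [(s.1, s.2.1)]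
        let icol := s.2.1 + 1
        if icol = ncol then (s.1 + 1, 0, acc) else (s.1, icol, acc))
      (0, 0, []) =
    ((n : Int) / ncol, (n : Int) % ncol,
      List.map (fun (k : Nat) => ((k : Int) / ncol, (k : Int) % ncol)) (List.range n)) := by
  induction n with
  | zero => simp
  | succ m ih =>
      rw [List.range_succ, List.foldl_append, List.map_append, ih]
      simp only [List.foldl_cons, List.foldl_nil, List.map_cons, List.map_nil]
      have hnz : ncol ≠ 0 := by omega
      have hr0 : 0 ≤ (m : Int) % ncol := Int.emod_nonneg _ hnz
      have hrlt : (m : Int) % ncol < ncol := Int.emod_lt_of_pos _ (by omega)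
      have hm : ncol * ((m : Int) / ncol) + (m : Int) % ncol = m := Int.mul_ediv_add_emod _ _
      push_cast
      split_ifs with hc
      · have heq : (m : Int) + 1 = ncol * ((m : Int) / ncol + 1) := by
          rw [mul_add, mul_one]; linarith
        have hd : ((m : Int) + 1) / ncol = (m : Int) / ncol + 1 := by
          rw [heq, Int.mul_ediv_cancel_left _ hnz]
        have he : ((m : Int) + 1) % ncol = 0 := by
          rw [heq, Int.mul_emod_right]
        rw [hd, he]
      · have heq : (m : Int) + 1 = ((m : Int) % ncol + 1) + ncol * ((m : Int) / ncol) := by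
          linarith
        have hlt : (m : Int) % ncol + 1 < ncol := by omega
        have hd : ((m : Int) + 1) / ncol = (m : Int) / ncol := by
          rw [heq, Int.add_mul_ediv_left _ _ hnz,
              Int.ediv_eq_zero_of_lt (by omega) hlt, zero_add]
        have he : ((m : Int) + 1) % ncol = (m : Int) % ncol + 1 := by
          rw [heq, Int.add_mul_emod_self_left, Int.emod_eq_of_lt (by omega) hlt]
        rw [hd, he]

-- ===== VERDICT (by name: the statement is the Claim_ definition above) =====
theorem len_to_2d_index_spec : Claim_equal_len_to_2d_index := by
  intro length ncol _ hpre
  unfold Pre_len_to_2d_index at hpre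
  unfold Spec_len_to_2d_index len_to_2d_index len_to_2d_index_alt
  rcases hpre with hpos | hlen
  case inr =>
    rw [PySem.List.pyRange_one]
    simp [Int.toNat_of_nonpos hlen]
  have hpos : (0 : Int) < ncol := by omega
  rw [len_to_2d_loop_inv ncol (by omega) length.toNat, PySem.List.pyRange_one]
  simp only [sub_zero, List.map_map]
  refine List.map_congr_left fun k _ => ?_
  simp only [Function.comp, zero_add]
  rw [PySem.Int.floordiv_eq_ediv_of_pos hpos, PySem.Int.mod_eq_emod_of_pos hpos]
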